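-- pv_equiv track=rewrite | github.com/mhtruong1031/YHack | web/backend/app/db.py | sync_database_url_for_alembic
-- ===== SOURCE A (Python) =====
-- def sync_database_url_for_alembic(url: str) -> str:
--     """Alembic runs sync migrations; use psycopg3 sync driver."""
--     u = url.strip()
--     for prefix in (
--         "postgresql+psycopg_async://",
--         "postgresql+asyncpg://",
--         "postgresql://",
--         "postgres://",
--     ):
--         if u.startswith(prefix):
--             rest = u[len(prefix) :]
--             return f"postgresql+psycopg://{rest}"
--     return u
-- ===== SOURCE B (Python) =====
-- SYNC_SCHEMES = {"postgresql+psycopg_async", "postgresql+asyncpg", "postgresql", "postgres"}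
--
--
-- def sync_database_url_for_alembic(url: str) -> str:
--     """Alembic runs sync migrations; use psycopg3 sync driver."""
--     u = url.strip()
--     i = u.find("://")
--     if i == -1:
--         return u
--     if u[:i] in SYNC_SCHEMES:
--         return f"postgresql+psycopg://{u[i + 3:]}"
--     return u
-- ===== Notes on version B (the rewrite author's own statement) =====
-- stated objective: simpler
-- what changed: Replaces the prefix-scanning loop over four full prefixes with a single find of the scheme separator, slicing off the scheme and testing it for membership in a set of known schemes.
import Mathlib
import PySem

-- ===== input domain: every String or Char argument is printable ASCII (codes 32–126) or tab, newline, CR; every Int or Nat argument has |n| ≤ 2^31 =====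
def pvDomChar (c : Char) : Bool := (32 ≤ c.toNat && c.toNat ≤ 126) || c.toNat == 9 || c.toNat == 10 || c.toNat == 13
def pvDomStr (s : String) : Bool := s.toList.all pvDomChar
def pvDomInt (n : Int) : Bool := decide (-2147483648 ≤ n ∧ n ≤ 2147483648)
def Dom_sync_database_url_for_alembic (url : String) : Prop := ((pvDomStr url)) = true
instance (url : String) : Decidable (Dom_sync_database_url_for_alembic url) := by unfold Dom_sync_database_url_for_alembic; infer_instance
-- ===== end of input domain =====

-- B replaces A's prefix-scanning loop by one find of "://", slicing off the scheme and a set-membership test (objective: simpler).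

-- ===== PORT A =====
def syncPrefixes : List String :=
  ["postgresql+psycopg_async://", "postgresql+asyncpg://", "postgresql://", "postgres://"]

def syncLoop (u : String) : List String → String
  | [] => u
  | p :: ps =>
    if PySem.Str.startswith u p then
      PySem.Str.join "" ["postgresql+psycopg://", PySem.Str.slice u (some (PySem.Str.len p)) none]
    else syncLoop u ps

def sync_database_url_for_alembic (url : String) : String :=
  syncLoop (PySem.Str.strip url) syncPrefixes

-- ===== PORT B =====
def syncSchemes : PySem.Set String :=
  PySem.Set.ofList ["postgresql+psycopg_async", "postgresql+asyncpg", "postgresql", "postgres"]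

def sync_database_url_for_alembic_alt (url : String) : String :=
  let u := PySem.Str.strip url
  let i := PySem.Str.find u "://"
  if i = -1 then u
  else if PySem.Set.contains syncSchemes (PySem.Str.slice u none (some i)) then
    PySem.Str.join "" ["postgresql+psycopg://", PySem.Str.slice u (some (i + 3)) none]
  else u

-- ===== PRECONDITION & SPEC =====
def Spec_sync_database_url_for_alembic (url : String) (out : String) : Prop := out = sync_database_url_for_alembic_alt url
instance (url : String) (out : String) : Decidable (Spec_sync_database_url_for_alembic url out) := by unfold Spec_sync_database_url_for_alembic; infer_instance

-- ===== CLAIM (what is proved, stated in full; the proofs are below) =====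
def Claim_equal_sync_database_url_for_alembic : Prop := ∀ (url : String), Dom_sync_database_url_for_alembic url → Spec_sync_database_url_for_alembic url (sync_database_url_for_alembic url)

-- ===== LEMMAS AND PROOFS =====

lemma str_eq_iff (x y : String) : x = y ↔ x.toList = y.toList := by
  constructor
  · intro h; rw [h]
  · intro h; exact String.toList_inj.mp h

-- a prefix that contains "://" cannot start a string with no "://"
lemma sw_false {v : String} (p : String) (hinf : "://".toList <:+: p.toList)
    (hni : ¬ ("://".toList <:+: v.toList)) : PySem.Str.startswith v p = false := by
  rw [PySem.Str.startswith_eq]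
  by_contra h
  have hp : p.toList <+: v.toList :=
    (PySem.Chars.startswith_iff _ _).mp (by revert h; cases PySem.Chars.startswith v.toList p.toList <;> simp)
  exact hni (hinf.trans hp.isInfix)

-- matching the literal prefix "sk://" is the same as the scheme before the FIRST "://" being sk
lemma prefix_scheme_iff (l sk : List Char) (hsk : ':' ∉ sk)
    (hpos : 0 ≤ PySem.Chars.find l ("://".toList)) :
    (sk ++ "://".toList <+: l) ↔ l.take (PySem.Chars.find l ("://".toList)).toNat = sk := by
  obtain ⟨hpre, hmin⟩ := PySem.Chars.find_spec hpos
  set n := (PySem.Chars.find l ("://".toList)).toNat with hn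
  constructor
  · rintro ⟨t, ht⟩
    have hdrop : l.drop sk.length = "://".toList ++ t := by
      rw [← ht, List.append_assoc, List.drop_left]
    have hle : n ≤ sk.length := by
      by_contra hc
      rw [not_le] at hc
      exact hmin _ hc ⟨t, by rw [hdrop]⟩
    have hge : sk.length ≤ n := by
      by_contra hc
      rw [not_le] at hc
      obtain ⟨t', ht'⟩ := hpre
      have h1 : l[n]? = some ':' := by
        have h0 : (l.drop n)[0]? = some ':' := by
          rw [← ht']; rfl
        simpa [List.getElem?_drop] using h0
      have hl2 : sk ++ ("://".toList ++ t) = l := by rw [← List.append_assoc]; exact ht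
      have h2 : l[n]? = sk[n]? := by
        rw [← hl2]; exact List.getElem?_append_left hc
      have h3 : sk[n]? = some ':' := by rw [← h2, h1]
      exact hsk (List.mem_of_getElem? h3)
    have hnl : n = sk.length := le_antisymm hle hge
    rw [hnl, ← ht, List.append_assoc, List.take_left]
  · intro htake
    obtain ⟨t', ht'⟩ := hpre
    refine ⟨t', ?_⟩
    rw [List.append_assoc, ht', ← htake, List.take_append_drop]

-- if the scheme before the first "://" is sk, the find index is sk.length
lemma find_eq_of_take (l sk : List Char)
    (hpos : 0 ≤ PySem.Chars.find l ("://".toList))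
    (htake : l.take (PySem.Chars.find l ("://".toList)).toNat = sk) :
    PySem.Chars.find l ("://".toList) = (sk.length : Int) := by
  have hle : PySem.Chars.find l ("://".toList) ≤ (l.length : Int) := PySem.Chars.find_le_length l _
  have hlen : (l.take (PySem.Chars.find l ("://".toList)).toNat).length = sk.length := by rw [htake]
  rw [List.length_take] at hlen
  omega

lemma syncCore (v : String) :
    syncLoop v syncPrefixes =
      (if PySem.Str.find v "://" = -1 then v
       else if PySem.Set.contains syncSchemes (PySem.Str.slice v none (some (PySem.Str.find v "://"))) then
         PySem.Str.join "" ["postgresql+psycopg://", PySem.Str.slice v (some (PySem.Str.find v "://" + 3)) none]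
       else v) := by
  by_cases hneg : PySem.Str.find v "://" = -1
  · have hni : ¬ ("://".toList <:+: v.toList) := by
      rw [PySem.Str.find_eq] at hneg
      exact (PySem.Chars.find_eq_neg_one_iff _ _).mp hneg
    have s1 := sw_false (v := v) "postgresql+psycopg_async://" (by decide) hni
    have s2 := sw_false (v := v) "postgresql+asyncpg://" (by decide) hni
    have s3 := sw_false (v := v) "postgresql://" (by decide) hni
    have s4 := sw_false (v := v) "postgres://" (by decide) hni
    simp only [syncLoop, syncPrefixes, s1, s2, s3, s4, Bool.false_eq_true, if_false, hneg]
    simp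
  · have hposc : 0 ≤ PySem.Chars.find v.toList "://".toList := by
      have h1 := PySem.Chars.neg_one_le_find v.toList "://".toList
      rw [PySem.Str.find_eq] at hneg
      omega
    have hslice : (PySem.Str.slice v none (some (PySem.Str.find v "://"))).toList
        = v.toList.take (PySem.Chars.find v.toList "://".toList).toNat := by
      rw [PySem.Str.find_eq]
      simp only [PySem.Str.toList_slice, PySem.Chars.slice_eq_listSlice]
      exact PySem.List.slice_to _ hposc
    have e1 : PySem.Str.startswith v "postgresql+psycopg_async://" = true
        ↔ v.toList.take (PySem.Chars.find v.toList "://".toList).toNat = "postgresql+psycopg_async".toList := by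
      rw [PySem.Str.startswith_eq, PySem.Chars.startswith_iff,
        show ("postgresql+psycopg_async://" : String).toList = "postgresql+psycopg_async".toList ++ "://".toList from by decide]
      exact prefix_scheme_iff _ _ (by decide) hposc
    have e2 : PySem.Str.startswith v "postgresql+asyncpg://" = true
        ↔ v.toList.take (PySem.Chars.find v.toList "://".toList).toNat = "postgresql+asyncpg".toList := by
      rw [PySem.Str.startswith_eq, PySem.Chars.startswith_iff,
        show ("postgresql+asyncpg://" : String).toList = "postgresql+asyncpg".toList ++ "://".toList from by decide]
      exact prefix_scheme_iff _ _ (by decide) hposc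
    have e3 : PySem.Str.startswith v "postgresql://" = true
        ↔ v.toList.take (PySem.Chars.find v.toList "://".toList).toNat = "postgresql".toList := by
      rw [PySem.Str.startswith_eq, PySem.Chars.startswith_iff,
        show ("postgresql://" : String).toList = "postgresql".toList ++ "://".toList from by decide]
      exact prefix_scheme_iff _ _ (by decide) hposc
    have e4 : PySem.Str.startswith v "postgres://" = true
        ↔ v.toList.take (PySem.Chars.find v.toList "://".toList).toNat = "postgres".toList := by
      rw [PySem.Str.startswith_eq, PySem.Chars.startswith_iff,
        show ("postgres://" : String).toList = "postgres".toList ++ "://".toList from by decide]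
      exact prefix_scheme_iff _ _ (by decide) hposc
    simp only [syncLoop, syncPrefixes]
    rw [if_neg hneg]
    by_cases t1 : v.toList.take (PySem.Chars.find v.toList "://".toList).toNat = "postgresql+psycopg_async".toList
    · have hx : PySem.Str.slice v none (some (PySem.Str.find v "://")) = ("postgresql+psycopg_async" : String) := by
        rw [str_eq_iff, hslice, t1]
      have hfind : PySem.Str.find v "://" = (24 : Int) := by
        rw [PySem.Str.find_eq]
        simpa using find_eq_of_take v.toList _ hposc t1
      rw [if_pos (e1.mpr t1), if_pos (by rw [hx]; decide), hfind,
        show PySem.Str.len "postgresql+psycopg_async://" = (27 : Int) from by decide]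
      norm_num
    · rw [if_neg (fun h => t1 (e1.mp h))]
      by_cases t2 : v.toList.take (PySem.Chars.find v.toList "://".toList).toNat = "postgresql+asyncpg".toList
      · have hx : PySem.Str.slice v none (some (PySem.Str.find v "://")) = ("postgresql+asyncpg" : String) := by
          rw [str_eq_iff, hslice, t2]
        have hfind : PySem.Str.find v "://" = (18 : Int) := by
          rw [PySem.Str.find_eq]
          simpa using find_eq_of_take v.toList _ hposc t2
        rw [if_pos (e2.mpr t2), if_pos (by rw [hx]; decide), hfind,
          show PySem.Str.len "postgresql+asyncpg://" = (21 : Int) from by decide]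
        norm_num
      · rw [if_neg (fun h => t2 (e2.mp h))]
        by_cases t3 : v.toList.take (PySem.Chars.find v.toList "://".toList).toNat = "postgresql".toList
        · have hx : PySem.Str.slice v none (some (PySem.Str.find v "://")) = ("postgresql" : String) := by
            rw [str_eq_iff, hslice, t3]
          have hfind : PySem.Str.find v "://" = (10 : Int) := by
            rw [PySem.Str.find_eq]
            simpa using find_eq_of_take v.toList _ hposc t3
          rw [if_pos (e3.mpr t3), if_pos (by rw [hx]; decide), hfind,
            show PySem.Str.len "postgresql://" = (13 : Int) from by decide]
          norm_num
        · rw [if_neg (fun h => t3 (e3.mp h))]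
          by_cases t4 : v.toList.take (PySem.Chars.find v.toList "://".toList).toNat = "postgres".toList
          · have hx : PySem.Str.slice v none (some (PySem.Str.find v "://")) = ("postgres" : String) := by
              rw [str_eq_iff, hslice, t4]
            have hfind : PySem.Str.find v "://" = (8 : Int) := by
              rw [PySem.Str.find_eq]
              simpa using find_eq_of_take v.toList _ hposc t4
            rw [if_pos (e4.mpr t4), if_pos (by rw [hx]; decide), hfind,
              show PySem.Str.len "postgres://" = (11 : Int) from by decide]
            norm_num
          · rw [if_neg (fun h => t4 (e4.mp h))]
            rw [if_neg ?hcB]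
            case hcB =>
              intro h
              have hmem : PySem.Str.slice v none (some (PySem.Str.find v "://")) = ("postgresql+psycopg_async" : String)
                  ∨ PySem.Str.slice v none (some (PySem.Str.find v "://")) = ("postgresql+asyncpg" : String)
                  ∨ PySem.Str.slice v none (some (PySem.Str.find v "://")) = ("postgresql" : String)
                  ∨ PySem.Str.slice v none (some (PySem.Str.find v "://")) = ("postgres" : String) := by
                simpa [syncSchemes, PySem.Set.contains, PySem.Set.ofList] using h
              rcases hmem with h' | h' | h' | h'
              · exact t1 (by rw [← hslice, h'])
              · exact t2 (by rw [← hslice, h'])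
              · exact t3 (by rw [← hslice, h'])
              · exact t4 (by rw [← hslice, h'])

-- ===== VERDICT (by name: the statement is the Claim_ definition above) =====
theorem sync_database_url_for_alembic_spec : Claim_equal_sync_database_url_for_alembic := by
  intro url _
  unfold Spec_sync_database_url_for_alembic sync_database_url_for_alembic sync_database_url_for_alembic_alt
  exact syncCore (PySem.Str.strip url)
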